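-- pv_equiv track=rewrite | github.com/kaspersespedal/hverdagsverktoy | scripts/fix_v11_saldo_15k_8lang.py | extract_array_bounds
-- ===== SOURCE A (Python) =====
-- def extract_array_bounds(content, key):
--     idx = content.find(f"{key}:")
--     if idx < 0:
--         return None
--     open_idx = content.find("[", idx)
--     depth = 1
--     i = open_idx + 1
--     while i < len(content) and depth > 0:
--         c = content[i]
--         if c == "'":
--             i += 1
--             while i < len(content):
--                 if content[i] == "\\" and i + 1 < len(content):
--                     i += 2
--                     continue
--                 if content[i] == "'":
--                     i += 1
--                     break
--                 i += 1
--             continue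
--         if c == "[":
--             depth += 1
--         elif c == "]":
--             depth -= 1
--             if depth == 0:
--                 return (open_idx, i + 1)
--         i += 1
--     return None
-- ===== SOURCE B (Python) =====
-- def _skip_str(content, i):
--     # i is just past an opening quote; return the index just past the closing
--     # quote, or len(content) if the string never terminates.  Instead of
--     # stepping char by char, jump with str.find and decide whether each quote
--     # is escaped by the parity of the backslash run immediately before it.
--     n = len(content)
--     p = i
--     while True:
--         j = content.find("'", p)
--         if j < 0:
--             return n
--         k = 0
--         while j - 1 - k >= p and content[j - 1 - k] == "\\":
--             k += 1
--         if k % 2 == 0: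
--             return j + 1
--         p = j + 1
--
--
-- def extract_array_bounds(content, key):
--     idx = content.find(f"{key}:")
--     if idx < 0:
--         return None
--     open_idx = content.find("[", idx)
--     depth = 1
--     i = open_idx + 1
--     while True:
--         cands = [j for j in (content.find("'", i),
--                              content.find("[", i),
--                              content.find("]", i)) if j >= 0]
--         if not cands:
--             return None
--         j = min(cands)
--         c = content[j]
--         if c == "'":
--             i = _skip_str(content, j + 1)
--         elif c == "[":
--             depth += 1
--             i = j + 1
--         else:
--             depth -= 1
--             if depth == 0:
--                 return (open_idx, j + 1)
--             i = j + 1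
-- ===== Notes on version B (the rewrite author's own statement) =====
-- stated objective: alternative
-- what changed: A's char-by-char depth scan with a nested escape-stepping string loop is replaced by str.find-driven jumps to the next relevant character, deciding whether a quote is escaped by the parity of the backslash run immediately before it instead of stepping over escapes.
import Mathlib
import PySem

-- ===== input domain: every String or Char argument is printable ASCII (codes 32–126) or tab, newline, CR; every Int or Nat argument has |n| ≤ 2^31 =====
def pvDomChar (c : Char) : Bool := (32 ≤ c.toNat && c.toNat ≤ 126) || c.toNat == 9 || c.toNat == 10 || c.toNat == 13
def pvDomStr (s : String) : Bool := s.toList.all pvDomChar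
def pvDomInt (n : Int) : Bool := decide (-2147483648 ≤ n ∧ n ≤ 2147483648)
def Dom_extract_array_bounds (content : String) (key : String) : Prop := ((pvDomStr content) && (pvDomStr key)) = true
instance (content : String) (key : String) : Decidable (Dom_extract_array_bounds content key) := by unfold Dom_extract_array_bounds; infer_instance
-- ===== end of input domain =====

-- B replaces A's char-by-char depth scan (with a nested escape-stepping string
-- loop) by str.find-driven jumps to the next relevant character, deciding
-- whether a quote is escaped by the parity of the backslash run before it.

-- ===== PORT A =====

-- inner `while` loop of A: skip over a quoted string starting at index i, return the new i
def pvStrSkip (cs : List Char) (i : Nat) : Nat :=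
  if h : i < cs.length then
    if cs[i] = '\\' ∧ i + 1 < cs.length then pvStrSkip cs (i + 2)
    else if cs[i] = '\'' then i + 1
    else pvStrSkip cs (i + 1)
  else i
termination_by cs.length - i

theorem pvStrSkip_ge (cs : List Char) (i : Nat) : i ≤ pvStrSkip cs i := by
  fun_induction pvStrSkip cs i with
  | case1 i h hc ih => omega
  | case2 i h hc hq => omega
  | case3 i h hc hq ih => omega
  | case4 i h => omega

-- outer `while i < len(content) and depth > 0` loop of A
def pvLoopA (cs : List Char) (open_idx : Int) (i depth : Nat) : Option (Int × Int) :=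
  if h : i < cs.length ∧ 0 < depth then
    if cs[i]'h.1 = '\'' then pvLoopA cs open_idx (pvStrSkip cs (i + 1)) depth
    else if cs[i]'h.1 = '[' then pvLoopA cs open_idx (i + 1) (depth + 1)
    else if cs[i]'h.1 = ']' then
      if depth - 1 = 0 then some (open_idx, (i : Int) + 1)
      else pvLoopA cs open_idx (i + 1) (depth - 1)
    else pvLoopA cs open_idx (i + 1) depth
  else none
termination_by cs.length - i
decreasing_by
  · have := pvStrSkip_ge cs (i + 1); omega
  · omega
  · omega
  · omega

def extract_array_bounds (content : String) (key : String) : Option (Int × Int) :=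
  let idx := PySem.Str.find content (key ++ ":")
  if idx < 0 then none
  else
    let open_idx := PySem.Str.findFrom content "[" idx
    pvLoopA content.toList open_idx (open_idx + 1).toNat 1

-- ===== PORT B =====

-- facts about a single-character str.find from index i (used for termination of B's loops)
theorem pvSingleton_prefix (cs : List Char) (t : Nat) (c : Char) :
    [c] <+: cs.drop t ↔ cs[t]? = some c := by
  constructor
  · rintro ⟨l, hl⟩
    rw [← List.head?_drop, ← hl]
    rfl
  · intro h
    have hh : (cs.drop t).head? = some c := by rw [List.head?_drop]; exact h
    cases hd : cs.drop t with
    | nil => rw [hd] at hh; simp at hh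
    | cons x xs =>
        rw [hd] at hh; simp at hh
        exact ⟨xs, by simp [hh]⟩

theorem pvFF_spec (cs : List Char) (c : Char) (i : Nat) (hi : i ≤ cs.length)
    (h : 0 ≤ PySem.Chars.findFrom cs [c] (i : Int) none) :
    i ≤ (PySem.Chars.findFrom cs [c] (i : Int) none).toNat ∧
    (PySem.Chars.findFrom cs [c] (i : Int) none).toNat < cs.length ∧
    cs[(PySem.Chars.findFrom cs [c] (i : Int) none).toNat]? = some c ∧
    (∀ t, i ≤ t → t < (PySem.Chars.findFrom cs [c] (i : Int) none).toNat → cs[t]? ≠ some c) := by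
  have hne : PySem.Chars.findFrom cs [c] (i : Int) none ≠ -1 := by omega
  obtain ⟨h1, h2, h3⟩ := PySem.Chars.findFrom_natCast_spec cs [c] i hi hne
  have hget := (pvSingleton_prefix cs _ c).1 h2
  refine ⟨by omega, ?_, hget, ?_⟩
  · exact (List.getElem?_eq_some_iff.1 hget).1
  · intro t ht1 ht2 hc
    exact h3 t ht1 ht2 ((pvSingleton_prefix cs t c).2 hc)

-- inner `while` of B's _skip_str: count the backslashes immediately before index j, not before p
def pvBackRun (cs : List Char) (p j k : Nat) : Nat :=
  if h : p + k + 1 ≤ j ∧ cs[j - 1 - k]? = some '\\' then pvBackRun cs p j (k + 1) else k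
termination_by j - k
decreasing_by omega

-- B's _skip_str: jump with find; quote escaped iff the backslash run before it has odd length.
-- The outer dite is a totality guard only: Python's find from a start past the end is -1,
-- so the loop returns n there, exactly the else branch.
def pvSkipB (cs : List Char) (p : Nat) : Nat :=
  if hp : p ≤ cs.length then
    if hj : PySem.Chars.findFrom cs ['\''] (p : Int) none < 0 then cs.length
    else
      if pvBackRun cs p (PySem.Chars.findFrom cs ['\''] (p : Int) none).toNat 0 % 2 = 0 then
        (PySem.Chars.findFrom cs ['\''] (p : Int) none).toNat + 1
      else pvSkipB cs ((PySem.Chars.findFrom cs ['\''] (p : Int) none).toNat + 1)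
  else cs.length
termination_by cs.length + 1 - p
decreasing_by
  have := pvFF_spec cs '\'' p hp (by omega)
  omega

theorem pvSkipB_ge (cs : List Char) (p : Nat) (hp : p ≤ cs.length) : p ≤ pvSkipB cs p := by
  fun_induction pvSkipB cs p with
  | case1 p hp' hj => omega
  | case2 p hp' hj he =>
      have := pvFF_spec cs '\'' p hp' (by omega)
      omega
  | case3 p hp' hj he ih =>
      have h := pvFF_spec cs '\'' p hp' (by omega)
      have := ih (by omega)
      omega
  | case4 p hp' => omega

-- helper for termination of B's main loop: any candidate produced by min(cands) is in [i, n)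
theorem pvMin_bounds (cs : List Char) (i : Nat) (hi : i ≤ cs.length) (j : Int)
    (hm : PySem.List.min? (([PySem.Chars.findFrom cs ['\''] (i : Int) none,
          PySem.Chars.findFrom cs ['['] (i : Int) none,
          PySem.Chars.findFrom cs [']'] (i : Int) none]).filter (fun j => decide (0 ≤ j)))
          (fun j => j) = some j) :
    i ≤ j.toNat ∧ j.toNat < cs.length := by
  have hmem := PySem.List.min?_mem hm
  rw [List.mem_filter] at hmem
  obtain ⟨hmem, hge⟩ := hmem
  have hge : (0 : Int) ≤ j := by simpa using hge
  simp only [List.mem_cons, List.not_mem_nil, or_false] at hmem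
  rcases hmem with h | h | h <;>
    · subst h
      have := pvFF_spec cs _ i hi hge
      omega

-- B's main loop: while True, jump to the nearest of the next "'", "[", "]"
def pvLoopB (cs : List Char) (open_idx : Int) (i depth : Nat) : Option (Int × Int) :=
  if hi : i ≤ cs.length then
    match hm : PySem.List.min? (([PySem.Chars.findFrom cs ['\''] (i : Int) none,
        PySem.Chars.findFrom cs ['['] (i : Int) none,
        PySem.Chars.findFrom cs [']'] (i : Int) none]).filter (fun j => decide (0 ≤ j)))
        (fun j => j) with
    | none => none
    | some j =>
        if cs[j.toNat]? = some '\'' then pvLoopB cs open_idx (pvSkipB cs (j.toNat + 1)) depth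
        else if cs[j.toNat]? = some '[' then pvLoopB cs open_idx (j.toNat + 1) (depth + 1)
        else
          if depth - 1 = 0 then some (open_idx, j + 1)
          else pvLoopB cs open_idx (j.toNat + 1) (depth - 1)
  else none
termination_by cs.length + 1 - i
decreasing_by
  · have h := pvMin_bounds cs i hi j hm
    have := pvSkipB_ge cs (j.toNat + 1) (by omega)
    omega
  · have := pvMin_bounds cs i hi j hm
    omega
  · have := pvMin_bounds cs i hi j hm
    omega

def extract_array_bounds_alt (content : String) (key : String) : Option (Int × Int) :=
  let idx := PySem.Str.find content (key ++ ":")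
  if idx < 0 then none
  else
    let open_idx := PySem.Str.findFrom content "[" idx
    pvLoopB content.toList open_idx (open_idx + 1).toNat 1

-- ===== PRECONDITION & SPEC =====
def Spec_extract_array_bounds (content : String) (key : String) (out : Option (Int × Int)) : Prop := out = extract_array_bounds_alt content key
instance (content : String) (key : String) (out : Option (Int × Int)) : Decidable (Spec_extract_array_bounds content key out) := by unfold Spec_extract_array_bounds; infer_instance

-- ===== CLAIM (what is proved, stated in full; the proofs are below) =====
def Claim_equal_extract_array_bounds : Prop := ∀ (content : String) (key : String), Dom_extract_array_bounds content key → Spec_extract_array_bounds content key (extract_array_bounds content key)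

-- ===== LEMMAS AND PROOFS =====

theorem pvFF_cases (cs : List Char) (c : Char) (i : Nat) (hi : i ≤ cs.length) :
    PySem.Chars.findFrom cs [c] (i : Int) none = -1 ∨
    0 ≤ PySem.Chars.findFrom cs [c] (i : Int) none := by
  rw [PySem.Chars.findFrom_natCast cs [c] i hi]
  split_ifs with h
  · exact Or.inl rfl
  · have := PySem.Chars.neg_one_le_find (cs.drop i) [c]
    right; omega

theorem pvFF_neg (cs : List Char) (c : Char) (i : Nat) (hi : i ≤ cs.length)
    (h : PySem.Chars.findFrom cs [c] (i : Int) none = -1) :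
    ∀ t, i ≤ t → cs[t]? ≠ some c := by
  intro t ht hc
  have hinf : ¬ [c] <:+: cs.drop i := (PySem.Chars.findFrom_natCast_eq_neg_one_iff cs [c] i hi).1 h
  apply hinf
  have hpre : [c] <+: cs.drop t := (pvSingleton_prefix cs t c).2 hc
  have hdd : cs.drop t = (cs.drop i).drop (t - i) := by rw [List.drop_drop]; congr 1; omega
  rw [hdd] at hpre
  exact hpre.isInfix.trans (List.drop_suffix _ _).isInfix

theorem pvStrSkip_le (cs : List Char) (p : Nat) (hp : p ≤ cs.length) : pvStrSkip cs p ≤ cs.length := by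
  revert hp
  fun_induction pvStrSkip cs p with
  | case1 i h hc ih => intro _; exact ih (by omega)
  | case2 i h hc hq => intro _; omega
  | case3 i h hc hq ih => intro _; exact ih (by omega)
  | case4 i h => intro hp; omega

-- pvBackRun scans to the FIRST k whose cell fails; characterisation and uniqueness
theorem pvBR_spec_aux (cs : List Char) (p j k : Nat) :
    k ≤ pvBackRun cs p j k ∧
    (∀ t, k ≤ t → t < pvBackRun cs p j k → p + t + 1 ≤ j ∧ cs[j - 1 - t]? = some '\\') ∧
    ¬ (p + pvBackRun cs p j k + 1 ≤ j ∧ cs[j - 1 - pvBackRun cs p j k]? = some '\\') := by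
  fun_induction pvBackRun cs p j k with
  | case1 k h ih =>
      obtain ⟨ih1, ih2, ih3⟩ := ih
      refine ⟨by omega, ?_, ih3⟩
      intro t ht1 ht2
      by_cases htk : t = k
      · subst htk; exact h
      · exact ih2 t (by omega) ht2
  | case2 k h => exact ⟨le_rfl, by omega, h⟩

theorem pvBR_spec (cs : List Char) (p j : Nat) :
    (∀ t, t < pvBackRun cs p j 0 → p + t + 1 ≤ j ∧ cs[j - 1 - t]? = some '\\') ∧
    ¬ (p + pvBackRun cs p j 0 + 1 ≤ j ∧ cs[j - 1 - pvBackRun cs p j 0]? = some '\\') := by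
  obtain ⟨-, h2, h3⟩ := pvBR_spec_aux cs p j 0
  exact ⟨fun t ht => h2 t (by omega) ht, h3⟩

theorem pvBR_eq (cs : List Char) (p j : Nat) (m : Nat)
    (h1 : ∀ t, t < m → p + t + 1 ≤ j ∧ cs[j - 1 - t]? = some '\\')
    (h2 : ¬ (p + m + 1 ≤ j ∧ cs[j - 1 - m]? = some '\\')) :
    pvBackRun cs p j 0 = m := by
  obtain ⟨hs1, hs2⟩ := pvBR_spec cs p j
  rcases lt_trichotomy (pvBackRun cs p j 0) m with h | h | h
  · exact absurd (h1 _ h) hs2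
  · exact h
  · exact absurd (hs1 m h) h2

theorem pvBR_shift1 (cs : List Char) (p j : Nat) (_hpj : p + 1 ≤ j)
    (hc : cs[p]? ≠ some '\\') :
    pvBackRun cs p j 0 = pvBackRun cs (p + 1) j 0 := by
  obtain ⟨hb1, hb2⟩ := pvBR_spec cs (p + 1) j
  apply pvBR_eq
  · intro t ht
    obtain ⟨x, y⟩ := hb1 t ht
    exact ⟨by omega, y⟩
  · rintro ⟨hbound, hchar⟩
    by_cases hbp : p + 1 + pvBackRun cs (p + 1) j 0 + 1 ≤ j
    · exact hb2 ⟨hbp, hchar⟩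
    · have hcell : j - 1 - pvBackRun cs (p + 1) j 0 = p := by omega
      rw [hcell] at hchar
      exact hc hchar

theorem pvBR_shift2 (cs : List Char) (p j : Nat) (hpj : p + 2 ≤ j)
    (hc : cs[p]? = some '\\') :
    pvBackRun cs p j 0 % 2 = pvBackRun cs (p + 2) j 0 % 2 := by
  obtain ⟨hb1, hb2⟩ := pvBR_spec cs (p + 2) j
  by_cases hbp : p + 2 + pvBackRun cs (p + 2) j 0 + 1 ≤ j
  · -- the run stopped on a non-backslash cell; the same scan happens with the lower bound
    have hchar : cs[j - 1 - pvBackRun cs (p + 2) j 0]? ≠ some '\\' := fun h => hb2 ⟨hbp, h⟩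
    have := pvBR_eq cs p j (pvBackRun cs (p + 2) j 0)
      (fun t ht => ⟨by have := (hb1 t ht).1; omega, (hb1 t ht).2⟩)
      (by rintro ⟨-, h⟩; exact hchar h)
    omega
  · -- the run reached the lower bound p+2: cells p+2..j-1 are all backslashes
    have hble : pvBackRun cs (p + 2) j 0 ≤ j - p - 2 := by
      by_contra hgt
      have := (hb1 (j - p - 2) (by omega)).1
      omega
    have hbeq : pvBackRun cs (p + 2) j 0 = j - p - 2 := by omega
    by_cases hq : cs[p + 1]? = some '\\'
    · -- whole tail p..j-1 is backslashes: run with bound p has length j-p, same parity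
      have := pvBR_eq cs p j (j - p)
        (by
          intro t ht
          refine ⟨by omega, ?_⟩
          by_cases h1 : t < j - p - 2
          · have := (hb1 t (by omega)).2
            exact this
          · by_cases h2 : t = j - p - 2
            · have hcell : j - 1 - t = p + 1 := by omega
              rw [hcell]; exact hq
            · have h3 : t = j - p - 1 := by omega
              have hcell : j - 1 - t = p := by omega
              rw [hcell]; exact hc)
        (by rintro ⟨h, -⟩; omega)
      omega
    · -- the run with bound p also stops at the non-backslash at p+1
      have := pvBR_eq cs p j (j - p - 2)
        (by
          intro t ht
          refine ⟨by omega, ?_⟩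
          have := (hb1 t (by omega)).2
          exact this)
        (by
          rintro ⟨-, h⟩
          have hcell : j - 1 - (j - p - 2) = p + 1 := by omega
          rw [hcell] at h
          exact hq h)
      omega

-- find for a single char is unchanged when the scan start moves past a non-occurrence
theorem pvFF_at (cs : List Char) (c : Char) (p : Nat) (hp : p ≤ cs.length)
    (hc : cs[p]? = some c) :
    PySem.Chars.findFrom cs [c] (p : Int) none = (p : Int) := by
  have hne : PySem.Chars.findFrom cs [c] (p : Int) none ≠ -1 := by
    intro h
    exact pvFF_neg cs c p hp h p le_rfl hc
  have h0 : 0 ≤ PySem.Chars.findFrom cs [c] (p : Int) none :=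
    (pvFF_cases cs c p hp).resolve_left hne
  obtain ⟨h1, -, -, h4⟩ := pvFF_spec cs c p hp h0
  have : (PySem.Chars.findFrom cs [c] (p : Int) none).toNat = p := by
    by_contra hne2
    exact h4 p le_rfl (by omega) hc
  omega

theorem pvFF_shift (cs : List Char) (c : Char) (p : Nat) (hp : p < cs.length)
    (hc : cs[p]? ≠ some c) :
    PySem.Chars.findFrom cs [c] (p : Int) none =
    PySem.Chars.findFrom cs [c] ((p + 1 : Nat) : Int) none := by
  rcases pvFF_cases cs c p (by omega) with h1 | h1
  · -- no occurrence from p, hence none from p+1 either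
    have hno := pvFF_neg cs c p (by omega) h1
    rw [h1]
    rcases pvFF_cases cs c (p + 1) (by omega) with h2 | h2
    · omega
    · obtain ⟨-, -, h3, -⟩ := pvFF_spec cs c (p + 1) (by omega) h2
      obtain ⟨ha, -, -, -⟩ := pvFF_spec cs c (p + 1) (by omega) h2
      exact absurd h3 (hno _ (by omega))
  · obtain ⟨ha, hb, hcc, hmin⟩ := pvFF_spec cs c p (by omega) h1
    have hgt : p + 1 ≤ (PySem.Chars.findFrom cs [c] (p : Int) none).toNat := by
      rcases Nat.eq_or_lt_of_le ha with h | h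
      · rw [← h] at hcc; exact absurd hcc hc
      · omega
    rcases pvFF_cases cs c (p + 1) (by omega) with h2 | h2
    · exact absurd hcc (pvFF_neg cs c (p + 1) (by omega) h2 _ hgt)
    · obtain ⟨ha', hb', hcc', hmin'⟩ := pvFF_spec cs c (p + 1) (by omega) h2
      have : (PySem.Chars.findFrom cs [c] (p : Int) none).toNat =
          (PySem.Chars.findFrom cs [c] ((p + 1 : Nat) : Int) none).toNat := by
        rcases lt_trichotomy (PySem.Chars.findFrom cs [c] (p : Int) none).toNat
          (PySem.Chars.findFrom cs [c] ((p + 1 : Nat) : Int) none).toNat with h | h | h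
        · exact absurd hcc (hmin' _ hgt h)
        · exact h
        · exact absurd hcc' (hmin _ (by omega) h)
      omega

-- step lemmas: pvSkipB is invariant under one step of A's escape-stepping scanner
theorem pvSB_end (cs : List Char) : pvSkipB cs cs.length = cs.length := by
  have hF : PySem.Chars.findFrom cs ['\''] ((cs.length : Nat) : Int) none = -1 := by
    rw [PySem.Chars.findFrom_natCast_eq_neg_one_iff cs ['\''] cs.length le_rfl]
    simp [List.drop_length]
  rw [pvSkipB, dif_pos le_rfl, hF]
  norm_num

theorem pvSB_quote (cs : List Char) (p : Nat) (hp : p < cs.length)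
    (hc : cs[p]? = some '\'') : pvSkipB cs p = p + 1 := by
  have hF := pvFF_at cs '\'' p (by omega) hc
  have hBR : pvBackRun cs p p 0 = 0 := by
    rw [pvBackRun, dif_neg (by rintro ⟨h, -⟩; omega)]
  rw [pvSkipB, dif_pos (by omega : p ≤ cs.length), hF]
  rw [dif_neg (by omega : ¬ ((p : Int) < 0))]
  simp [Int.toNat_natCast, hBR]

theorem pvSB_step1 (cs : List Char) (p : Nat) (hp : p < cs.length)
    (hq : cs[p]? ≠ some '\'') (hb : cs[p]? ≠ some '\\') :
    pvSkipB cs p = pvSkipB cs (p + 1) := by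
  have hsh := pvFF_shift cs '\'' p hp hq
  rw [pvSkipB, dif_pos (by omega : p ≤ cs.length), hsh]
  by_cases hj : PySem.Chars.findFrom cs ['\''] ((p + 1 : Nat) : Int) none < 0
  · rw [dif_pos hj]
    conv_rhs => rw [pvSkipB]
    rw [dif_pos (show p + 1 ≤ cs.length by omega), dif_pos hj]
  · obtain ⟨ha, hb', -, -⟩ := pvFF_spec cs '\'' (p + 1) (by omega) (by omega)
    rw [dif_neg hj, pvBR_shift1 cs p _ (by omega) hb]
    conv_rhs => rw [pvSkipB]
    rw [dif_pos (show p + 1 ≤ cs.length by omega), dif_neg hj]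

theorem pvSB_back2 (cs : List Char) (p : Nat) (hp : p + 1 < cs.length)
    (hb : cs[p]? = some '\\') :
    pvSkipB cs p = pvSkipB cs (p + 2) := by
  have hbq : cs[p]? ≠ some '\'' := by rw [hb]; simp
  by_cases hq1 : cs[p + 1]? = some '\''
  · -- the very next char is a quote; it is escaped by the backslash at p
    have hF : PySem.Chars.findFrom cs ['\''] (p : Int) none = ((p + 1 : Nat) : Int) := by
      rw [pvFF_shift cs '\'' p (by omega) hbq, pvFF_at cs '\'' (p + 1) (by omega) hq1]
    have hBR : pvBackRun cs p (p + 1) 0 = 1 := by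
      rw [pvBackRun, dif_pos ⟨by omega, by simpa using hb⟩]
      rw [pvBackRun, dif_neg (by rintro ⟨h, -⟩; omega)]
    rw [pvSkipB, dif_pos (by omega : p ≤ cs.length), hF]
    rw [dif_neg (by omega : ¬ (((p + 1 : Nat) : Int) < 0))]
    simp [hBR]
  · have hsh : PySem.Chars.findFrom cs ['\''] (p : Int) none =
        PySem.Chars.findFrom cs ['\''] ((p + 2 : Nat) : Int) none := by
      rw [pvFF_shift cs '\'' p (by omega) hbq,
          pvFF_shift cs '\'' (p + 1) (by omega) hq1]
    rw [pvSkipB, dif_pos (by omega : p ≤ cs.length), hsh]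
    by_cases hj : PySem.Chars.findFrom cs ['\''] ((p + 2 : Nat) : Int) none < 0
    · rw [dif_pos hj]
      conv_rhs => rw [pvSkipB]
      rw [dif_pos (show p + 2 ≤ cs.length by omega), dif_pos hj]
    · obtain ⟨ha, -, -, -⟩ := pvFF_spec cs '\'' (p + 2) (by omega) (by omega)
      have hpar := pvBR_shift2 cs p
        (PySem.Chars.findFrom cs ['\''] ((p + 2 : Nat) : Int) none).toNat (by omega) hb
      rw [dif_neg hj, hpar]
      conv_rhs => rw [pvSkipB]
      rw [dif_pos (show p + 2 ≤ cs.length by omega), dif_neg hj]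

theorem pvSB_lastback (cs : List Char) (p : Nat) (hp : p + 1 = cs.length)
    (hb : cs[p]? = some '\\') :
    pvSkipB cs p = cs.length := by
  have hF : PySem.Chars.findFrom cs ['\''] (p : Int) none = -1 := by
    by_contra h
    have h0 : 0 ≤ PySem.Chars.findFrom cs ['\''] (p : Int) none :=
      (pvFF_cases cs '\'' p (by omega)).resolve_left h
    obtain ⟨h1, h2, h3, -⟩ := pvFF_spec cs '\'' p (by omega) h0
    have : (PySem.Chars.findFrom cs ['\''] (p : Int) none).toNat = p := by omega
    rw [this, hb] at h3
    simp at h3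
  rw [pvSkipB, dif_pos (by omega : p ≤ cs.length), hF]
  norm_num

-- the two string skippers agree
theorem pvSkipB_eq (cs : List Char) (p : Nat) (hp : p ≤ cs.length) :
    pvSkipB cs p = pvStrSkip cs p := by
  revert hp
  fun_induction pvStrSkip cs p with
  | case1 i h hc ih =>
      intro hp
      rw [pvSB_back2 cs i hc.2 (by simp [List.getElem?_eq_getElem h, hc.1])]
      exact ih (by omega)
  | case2 i h hc hq =>
      intro hp
      exact pvSB_quote cs i h (by simp [List.getElem?_eq_getElem h, hq])
  | case3 i h hc hq ih =>
      intro hp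
      have hgi : cs[i]? = some cs[i] := List.getElem?_eq_getElem h
      by_cases hbs : cs[i] = '\\'
      · have hend : i + 1 = cs.length := by
          rcases Nat.lt_or_ge (i + 1) cs.length with h2 | h2
          · exact absurd ⟨hbs, h2⟩ hc
          · omega
        rw [pvSB_lastback cs i hend (by rw [hgi, hbs]),
            pvStrSkip, dif_neg (by omega : ¬ i + 1 < cs.length)]
        omega
      · rw [pvSB_step1 cs i h (by rw [hgi]; exact fun he => hq (by simpa using he))
            (by rw [hgi]; exact fun he => hbs (by simpa using he))]
        exact ih (by omega)
  | case4 i h =>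
      intro hp
      have : i = cs.length := by omega
      subst this
      exact pvSB_end cs

-- A's outer loop just walks over non-special characters
theorem pvLoopA_skip (cs : List Char) (oi : Int) (d : Nat) (hd : 0 < d) :
    ∀ m i j, j - i ≤ m → i ≤ j → j ≤ cs.length →
    (∀ t, i ≤ t → t < j → cs[t]? ≠ some '\'' ∧ cs[t]? ≠ some '[' ∧ cs[t]? ≠ some ']') →
    pvLoopA cs oi i d = pvLoopA cs oi j d := by
  intro m
  induction m with
  | zero =>
      intro i j h1 h2 _ _
      have : i = j := by omega
      rw [this]
  | succ m ih =>
      intro i j h1 h2 h3 h4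
      by_cases hij : i = j
      · rw [hij]
      · have hi : i < cs.length := by omega
        have hgi : cs[i]? = some (cs[i]'hi) := List.getElem?_eq_getElem hi
        obtain ⟨n1, n2, n3⟩ := h4 i le_rfl (by omega)
        rw [pvLoopA, dif_pos ⟨hi, hd⟩,
            if_neg (fun he => n1 (by rw [hgi, he])),
            if_neg (fun he => n2 (by rw [hgi, he])),
            if_neg (fun he => n3 (by rw [hgi, he]))]
        exact ih (i + 1) j (by omega) (by omega) h3 (fun t ht1 ht2 => h4 t (by omega) ht2)

theorem pvLoopA_none (cs : List Char) (oi : Int) (i d : Nat) (h : ¬ (i < cs.length ∧ 0 < d)) :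
    pvLoopA cs oi i d = none := by
  rw [pvLoopA, dif_neg h]

-- the loops agree
theorem pvLoopAB (cs : List Char) (oi : Int) :
    ∀ fuel i d, cs.length + 1 - i ≤ fuel → i ≤ cs.length → 0 < d →
    pvLoopA cs oi i d = pvLoopB cs oi i d := by
  intro fuel
  induction fuel with
  | zero => intro i d hf hi hd; omega
  | succ fuel ih =>
      intro i d hf hi hd
      rw [pvLoopB, dif_pos hi]
      split
      · -- no candidate: no special character at or after i
        rename_i hm
        have hnil := (PySem.List.min?_eq_none_iff _ _).1 hm
        rw [List.filter_eq_nil_iff] at hnil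
        have hspec : ∀ c : Char, c = '\'' ∨ c = '[' ∨ c = ']' →
            ∀ t, i ≤ t → cs[t]? ≠ some c := by
          intro c hcm
          have hmem : PySem.Chars.findFrom cs [c] (i : Int) none ∈
              [PySem.Chars.findFrom cs ['\''] (i : Int) none,
               PySem.Chars.findFrom cs ['['] (i : Int) none,
               PySem.Chars.findFrom cs [']'] (i : Int) none] := by
            rcases hcm with h | h | h <;> subst h <;> simp
          have hneg := hnil _ hmem
          have : PySem.Chars.findFrom cs [c] (i : Int) none = -1 := by
            rcases pvFF_cases cs c i hi with h | h
            · exact h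
            · simp at hneg; omega
          exact pvFF_neg cs c i hi this
        rw [pvLoopA_skip cs oi d hd (cs.length - i) i cs.length (by omega) hi le_rfl
            (fun t ht1 ht2 => ⟨hspec '\'' (by simp) t ht1, hspec '[' (by simp) t ht1,
              hspec ']' (by simp) t ht1⟩)]
        exact pvLoopA_none cs oi cs.length d (by omega)
      · rename_i j hm
        have hjmem := PySem.List.min?_mem hm
        rw [List.mem_filter] at hjmem
        obtain ⟨hjmem, hge⟩ := hjmem
        have hge : (0 : Int) ≤ j := by simpa using hge
        have hjmin := PySem.List.min?_isMin hm
        simp only [List.mem_cons, List.not_mem_nil, or_false] at hjmem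
        -- j is in [i, n) and carries a special character
        have hbnd : i ≤ j.toNat ∧ j.toNat < cs.length ∧
            (cs[j.toNat]? = some '\'' ∨ cs[j.toNat]? = some '[' ∨ cs[j.toNat]? = some ']') := by
          rcases hjmem with h | h | h <;> subst h <;>
            · obtain ⟨a, b, c, -⟩ := pvFF_spec cs _ i hi hge
              exact ⟨a, b, by tauto⟩
        obtain ⟨hij, hjn, hjc⟩ := hbnd
        -- no special character strictly between i and j
        have hone : ∀ c : Char, PySem.Chars.findFrom cs [c] (i : Int) none ∈
            [PySem.Chars.findFrom cs ['\''] (i : Int) none,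
             PySem.Chars.findFrom cs ['['] (i : Int) none,
             PySem.Chars.findFrom cs [']'] (i : Int) none] →
            ∀ t, i ≤ t → t < j.toNat → cs[t]? ≠ some c := by
          intro c hcmem t ht1 ht2 hcc
          have hFne : PySem.Chars.findFrom cs [c] (i : Int) none ≠ -1 := by
            intro h
            exact pvFF_neg cs c i hi h t ht1 hcc
          have hF0 : (0 : Int) ≤ PySem.Chars.findFrom cs [c] (i : Int) none :=
            (pvFF_cases cs c i hi).resolve_left hFne
          obtain ⟨-, -, -, hFmin⟩ := pvFF_spec cs c i hi hF0
          have hle := hjmin _ (List.mem_filter.2 ⟨hcmem, by simpa using hF0⟩)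
          have hFt : (PySem.Chars.findFrom cs [c] (i : Int) none).toNat ≤ t := by
            by_contra hgt
            exact hFmin t ht1 (by omega) hcc
          omega
        have hmid : ∀ t, i ≤ t → t < j.toNat →
            cs[t]? ≠ some '\'' ∧ cs[t]? ≠ some '[' ∧ cs[t]? ≠ some ']' := by
          intro t ht1 ht2
          exact ⟨hone '\'' (by simp) t ht1 ht2, hone '[' (by simp) t ht1 ht2,
            hone ']' (by simp) t ht1 ht2⟩
        rw [pvLoopA_skip cs oi d hd (j.toNat - i) i j.toNat (by omega) hij (by omega) hmid]
        rw [pvLoopA, dif_pos ⟨hjn, hd⟩]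
        have hgj : cs[j.toNat]? = some (cs[j.toNat]'hjn) := List.getElem?_eq_getElem hjn
        by_cases hq : cs[j.toNat]'hjn = '\''
        · rw [if_pos hq, if_pos (by rw [hgj]; exact congrArg some hq)]
          rw [pvSkipB_eq cs (j.toNat + 1) (by omega)]
          have hs1 := pvStrSkip_ge cs (j.toNat + 1)
          have hs2 := pvStrSkip_le cs (j.toNat + 1) (by omega)
          exact ih (pvStrSkip cs (j.toNat + 1)) d (by omega) hs2 hd
        · rw [if_neg hq, if_neg (show ¬ (cs[j.toNat]? = some '\'') from
            fun he => hq (by rw [hgj] at he; simpa using he))]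
          by_cases ho : cs[j.toNat]'hjn = '['
          · rw [if_pos ho, if_pos (by rw [hgj]; exact congrArg some ho)]
            exact ih (j.toNat + 1) (d + 1) (by omega) (by omega) (by omega)
          · rw [if_neg ho, if_neg (show ¬ (cs[j.toNat]? = some '[') from
              fun he => ho (by rw [hgj] at he; simpa using he))]
            have hcl : cs[j.toNat]'hjn = ']' := by
              rcases hjc with h | h | h
              · rw [hgj] at h; exact absurd (by simpa using h) hq
              · rw [hgj] at h; exact absurd (by simpa using h) ho
              · rw [hgj] at h; simpa using h
            rw [if_pos hcl]
            by_cases hdep : d - 1 = 0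
            · rw [if_pos hdep, if_pos hdep]
              have : ((j.toNat : Int)) = j := by omega
              rw [this]
            · rw [if_neg hdep, if_neg hdep]
              exact ih (j.toNat + 1) (d - 1) (by omega) (by omega) (by omega)

-- ===== VERDICT (by name: the statement is the Claim_ definition above) =====
theorem extract_array_bounds_spec : Claim_equal_extract_array_bounds := by
  intro content key _
  unfold Spec_extract_array_bounds extract_array_bounds extract_array_bounds_alt
  simp only []
  split
  · rfl
  · rename_i hidx
    apply pvLoopAB content.toList _ (content.toList.length + 1) _ 1 _ _ (by omega)
    · omega
    · -- (open_idx + 1).toNat ≤ length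
      rw [PySem.Str.findFrom_eq]
      rcases pvFF_cases content.toList '[' (PySem.Str.find content (key ++ ":")).toNat
          (by
            have h1 := PySem.Chars.find_le_length content.toList (key ++ ":").toList
            rw [PySem.Str.find_eq] at hidx ⊢
            omega) with h | h
      · rw [show ((PySem.Str.find content (key ++ ":")) : Int) =
            (((PySem.Str.find content (key ++ ":")).toNat : Nat) : Int) by omega,
          show ("[".toList) = ['['] from rfl, h]
        omega
      · obtain ⟨-, hlt, -, -⟩ := pvFF_spec content.toList '['
          (PySem.Str.find content (key ++ ":")).toNat
          (by
            have h1 := PySem.Chars.find_le_length content.toList (key ++ ":").toList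
            rw [PySem.Str.find_eq] at hidx ⊢
            omega) h
        rw [show ((PySem.Str.find content (key ++ ":")) : Int) =
            (((PySem.Str.find content (key ++ ":")).toNat : Nat) : Int) by omega,
          show ("[".toList) = ['['] from rfl]
        omega
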